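-- pv_equiv track=rewrite | github.com/limelier/advent-of-code-2020 | 10/main.py | permutation_search
-- ===== SOURCE A (Python) =====
-- def bruteforce(sequence):
--     perms = {''.join(str(i) for i in sequence)}
--     for i in range(len(sequence) - 1):
--         diff_sum = sequence[i] + sequence[i+1]
--         if diff_sum <= 3:
--             perms = perms.union(bruteforce(sequence[:i] + [diff_sum] + sequence[i+2:]))
--     return perms
--
-- def bruteforce_ones(seq_len):
--     sequence = [1] * seq_len
--     return len(bruteforce(sequence))
--
-- def permutation_search(diffs):
--     seq_perms = {}
--
--     perms = 1
--     seq_start, current = None, 0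
--
--     # search for sequences of consecutive ones
--     while current < len(diffs):
--         if diffs[current] == 1:
--             if seq_start is None:
--                 seq_start = current  # start sequence
--             # else continue sequence
--         else:
--             if seq_start is not None:  # curr is 3, ending sequence
--                 seq_len = current - seq_start
--                 if seq_len in seq_perms.keys():
--                     perms *= seq_perms[seq_len]
--                 else:
--                     val = bruteforce_ones(seq_len)
--                     seq_perms[seq_len] = val
--                     perms *= val
--             seq_start = None
--         current += 1
--     return perms
-- ===== SOURCE B (Python) =====
-- def permutation_search(diffs):
--     # Tribonacci DP: a run of k consecutive 1-diffs contributes the number of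
--     # compositions of k into parts 1..3; multiply the counts over all runs.
--     def run_count(n):
--         a, b, c = 1, 0, 0
--         for _ in range(n):
--             a, b, c = a + b + c, a, b
--         return a
--
--     total = 1
--     run = 0
--     for d in diffs:
--         if d == 1:
--             run += 1
--         else:
--             total *= run_count(run)
--             run = 0
--     return total * run_count(run)
-- ===== Notes on version B (the rewrite author's own statement) =====
-- stated objective: alternative
-- what changed: B replaces A's recursive enumeration of adjacent-merge sequences as a set of strings (memoised per run length) with a single pass over diffs that counts each run of 1s directly by the tribonacci recurrence for compositions into parts 1..3.
-- intended difference: On lists whose last two elements are both 1 (a trailing run of two or more 1-diffs), A returns the product over the earlier runs only because its scan closes a run only when it sees a non-1 and so silently drops the trailing run, while B also multiplies in the trailing run's arrangement count (e.g. on [1,1] A returns 1, B returns 2); B's value is the intended product over all runs. — e.g. on permutation_search([1, 1]): A returns 1, B returns 2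
import Mathlib
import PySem

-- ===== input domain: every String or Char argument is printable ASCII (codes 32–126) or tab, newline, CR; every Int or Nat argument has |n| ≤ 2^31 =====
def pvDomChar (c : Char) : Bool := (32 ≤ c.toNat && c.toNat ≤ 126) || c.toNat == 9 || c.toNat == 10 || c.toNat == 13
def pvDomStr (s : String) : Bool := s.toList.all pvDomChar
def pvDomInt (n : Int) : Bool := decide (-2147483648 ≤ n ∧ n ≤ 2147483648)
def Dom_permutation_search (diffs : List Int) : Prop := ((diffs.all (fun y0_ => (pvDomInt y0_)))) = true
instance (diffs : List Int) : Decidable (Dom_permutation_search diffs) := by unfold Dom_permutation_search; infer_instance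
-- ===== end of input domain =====

-- B replaces A's brute-force enumeration of merge sequences (a recursively built set of strings,
-- memoised per run length) by a tribonacci-recurrence count of the compositions of each run of 1s
-- into parts 1..3; B also counts a trailing run of 1s that A's scan silently drops (the intended
-- difference D_ below).

-- ===== PORT A =====
-- ''.join(str(i) for i in sequence)
def pvJoin (sequence : List Int) : String :=
  PySem.Str.join "" (sequence.map PySem.Int.toStr)

-- Python's recursion terminates because each recursive call is on a list one element shorter;
-- 'fuel' is ONLY that termination measure: with fuel = sequence.length the 0-case coincides with
-- the loop body (length 0 ⇒ range(len-1) is empty), so the port is A's recursion step for step.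
def bruteforce : Nat → List Int → PySem.Set String
  | 0, sequence => PySem.Set.ofList [pvJoin sequence]
  | fuel + 1, sequence =>
    (List.range (sequence.length - 1)).foldl
      (fun perms i =>
        -- i and i+1 are in range (i < len-1), so getD i 0 is exactly Python's sequence[i];
        -- take/drop are Python's sequence[:i] / sequence[i+2:] for these nonnegative indices
        let diff_sum := sequence.getD i 0 + sequence.getD (i + 1) 0
        if diff_sum ≤ 3 then
          PySem.Set.union perms
            (bruteforce fuel (sequence.take i ++ [diff_sum] ++ sequence.drop (i + 2)))
        else perms)
      (PySem.Set.ofList [pvJoin sequence])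

-- seq_len is always a nonnegative run length (current - seq_start), so it is a Nat here
def bruteforce_ones (seq_len : Nat) : Int :=
  PySem.Set.len (bruteforce seq_len (List.replicate seq_len 1))

-- the while loop: 'current' walks the list one index per iteration, so it is structural
-- recursion on the remaining suffix, carrying current / seq_start / seq_perms / perms
def psLoop : List Int → Nat → Option Nat → PySem.Dict Nat Int → Int → Int
  | [], _, _, _, perms => perms
  | d :: rest, current, seq_start, seq_perms, perms =>
    if d = 1 then
      match seq_start with
      | none => psLoop rest (current + 1) (some current) seq_perms perms
      | some s => psLoop rest (current + 1) (some s) seq_perms perms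
    else
      match seq_start with
      | some s =>
        let seq_len := current - s
        -- 'if seq_len in seq_perms.keys(): perms *= seq_perms[seq_len]' = match on get?
        match seq_perms.get? seq_len with
        | some v => psLoop rest (current + 1) none seq_perms (perms * v)
        | none =>
          psLoop rest (current + 1) none
            (seq_perms.insert seq_len (bruteforce_ones seq_len))
            (perms * bruteforce_ones seq_len)
      | none => psLoop rest (current + 1) none seq_perms perms

def permutation_search (diffs : List Int) : Int :=
  psLoop diffs 0 none PySem.Dict.empty 1

-- ===== PORT B =====
-- run_count in Source B: tribonacci DP, state (a, b, c) stepped n times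
def run_count (n : Nat) : Int :=
  ((List.range n).foldl
      (fun (s : Int × Int × Int) _ => (s.1 + s.2.1 + s.2.2, s.1, s.2.1))
      (1, 0, 0)).1

-- the body of Source B's for loop over diffs, state (total, run)
def bstep (st : Int × Nat) (d : Int) : Int × Nat :=
  if d = 1 then (st.1, st.2 + 1) else (st.1 * run_count st.2, 0)

def permutation_search_alt (diffs : List Int) : Int :=
  let st := diffs.foldl bstep (1, 0)
  st.1 * run_count st.2

-- ===== PRECONDITION & SPEC =====
-- On a list ending with two or more 1s, A returns the product over the EARLIER runs only (its
-- scan closes a run only at a non-1, so the trailing run is silently dropped), while B also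
-- multiplies the trailing run's count, which is the intended value for the function's purpose.
def D_permutation_search (diffs : List Int) : Prop := diffs.reverse.take 2 = [1, 1]
instance (diffs : List Int) : Decidable (D_permutation_search diffs) := by
  unfold D_permutation_search; infer_instance

def Spec_permutation_search (diffs : List Int) (out : Int) : Prop :=
  ¬ D_permutation_search diffs → out = permutation_search_alt diffs
instance (diffs : List Int) (out : Int) : Decidable (Spec_permutation_search diffs out) := by
  unfold Spec_permutation_search; infer_instance

def pvDiffWitness_permutation_search : List Int := [1, 1]
def pvDiffWitnessOut_permutation_search : Int × Int := (1, 2)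

-- ===== CLAIM (what is proved, stated in full; the proofs are below) =====
def Claim_unchanged_permutation_search : Prop :=
  ∀ (diffs : List Int), Dom_permutation_search diffs →
    Spec_permutation_search diffs (permutation_search diffs)
def Claim_changed_permutation_search : Prop :=
  Dom_permutation_search (pvDiffWitness_permutation_search) ∧
  D_permutation_search (pvDiffWitness_permutation_search) ∧
  permutation_search (pvDiffWitness_permutation_search) = pvDiffWitnessOut_permutation_search.1 ∧
  permutation_search_alt (pvDiffWitness_permutation_search) = pvDiffWitnessOut_permutation_search.2 ∧
  pvDiffWitnessOut_permutation_search.1 ≠ pvDiffWitnessOut_permutation_search.2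
def Claim_exact_permutation_search : Prop :=
  ∀ (diffs : List Int), Dom_permutation_search diffs → D_permutation_search diffs →
    permutation_search diffs ≠ permutation_search_alt diffs

-- ===== LEMMAS AND PROOFS =====

-- ---- generic lemmas about A's foldl-of-unions loop ----
theorem mem_foldl_union {β : Type} (l : List β) (init : PySem.Set String)
    (c : β → Prop) [DecidablePred c] (f : β → PySem.Set String) (x : String) :
    x ∈ l.foldl (fun perms i => if c i then PySem.Set.union perms (f i) else perms) init ↔
      x ∈ init ∨ ∃ i ∈ l, c i ∧ x ∈ f i := by
  induction l generalizing init with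
  | nil => simp
  | cons b l ih =>
    simp only [List.foldl_cons]
    by_cases hb : c b
    · rw [if_pos hb, ih]
      simp only [PySem.Set.mem_union, List.mem_cons]
      constructor
      · rintro (⟨h | h⟩ | ⟨i, hi, hc, hx⟩)
        · exact Or.inl h
        · exact Or.inr ⟨b, Or.inl rfl, hb, h⟩
        · exact Or.inr ⟨i, Or.inr hi, hc, hx⟩
      · rintro (h | ⟨i, hi | hi, hc, hx⟩)
        · exact Or.inl (Or.inl h)
        · exact Or.inl (Or.inr (hi ▸ hx))
        · exact Or.inr ⟨i, hi, hc, hx⟩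
    · rw [if_neg hb, ih]
      simp only [List.mem_cons]
      constructor
      · rintro (h | ⟨i, hi, hc, hx⟩)
        · exact Or.inl h
        · exact Or.inr ⟨i, Or.inr hi, hc, hx⟩
      · rintro (h | ⟨i, hi | hi, hc, hx⟩)
        · exact Or.inl h
        · exact absurd (hi ▸ hc) hb
        · exact Or.inr ⟨i, hi, hc, hx⟩

theorem nodup_foldl_union {β : Type} (l : List β) (init : PySem.Set String)
    (c : β → Prop) [DecidablePred c] (f : β → PySem.Set String) (h : init.Nodup) :
    (l.foldl (fun perms i => if c i then PySem.Set.union perms (f i) else perms) init).Nodup := by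
  induction l generalizing init with
  | nil => exact h
  | cons b l ih =>
    simp only [List.foldl_cons]
    by_cases hb : c b
    · simp only [hb, if_pos]
      exact ih _ (PySem.Set.nodup_union _ _ h)
    · simp only [hb, if_neg, not_false_iff]
      exact ih _ h

-- ---- the merge-step relation behind bruteforce ----
def MStep (s t : List Int) : Prop :=
  ∃ i : Nat, i + 1 < s.length ∧ s.getD i 0 + s.getD (i + 1) 0 ≤ 3 ∧
    t = s.take i ++ [s.getD i 0 + s.getD (i + 1) 0] ++ s.drop (i + 2)

def Reach : List Int → List Int → Prop := Relation.ReflTransGen MStep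

theorem length_of_MStep {s t : List Int} (h : MStep s t) : t.length + 1 = s.length := by
  obtain ⟨i, hi, _, ht⟩ := h
  subst ht
  simp [List.length_take, List.length_drop]
  omega

theorem length_le_of_Reach {s t : List Int} (h : Reach s t) : t.length ≤ s.length := by
  induction h with
  | refl => exact le_refl _
  | tail _ hst ih => have := length_of_MStep hst; omega

theorem mem_bruteforce_imp :
    ∀ (fuel : Nat) (s : List Int) (x : String), x ∈ bruteforce fuel s →
      ∃ t, Reach s t ∧ x = pvJoin t := by
  intro fuel
  induction fuel with
  | zero =>
    intro s x hx
    refine ⟨s, Relation.ReflTransGen.refl, ?_⟩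
    simpa [bruteforce, PySem.Set.mem_ofList] using hx
  | succ fuel ih =>
    intro s x hx
    rw [bruteforce, mem_foldl_union] at hx
    rcases hx with hx | ⟨i, hi, hc, hx⟩
    · exact ⟨s, Relation.ReflTransGen.refl,
        by simpa [PySem.Set.mem_ofList] using hx⟩
    · obtain ⟨t, ht, hxt⟩ := ih _ _ hx
      refine ⟨t, Relation.ReflTransGen.head ⟨i, ?_, hc, rfl⟩ ht, hxt⟩
      have := List.mem_range.mp hi; omega

theorem mem_bruteforce_self (fuel : Nat) (s : List Int) :
    pvJoin s ∈ bruteforce fuel s := by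
  cases fuel with
  | zero => simp [bruteforce, PySem.Set.mem_ofList]
  | succ fuel =>
    rw [bruteforce, mem_foldl_union]
    exact Or.inl (by simp [PySem.Set.mem_ofList])

theorem mem_bruteforce_step {s u : List Int} (h : MStep s u) {fuel : Nat} {x : String}
    (hx : x ∈ bruteforce fuel u) : x ∈ bruteforce (fuel + 1) s := by
  obtain ⟨i, hi, hc, hu⟩ := h
  rw [bruteforce, mem_foldl_union]
  exact Or.inr ⟨i, List.mem_range.mpr (by omega), hc, by rw [← hu]; exact hx⟩

theorem mem_bruteforce_of_reach :
    ∀ {s t : List Int}, Reach s t → ∀ fuel, s.length ≤ fuel + t.length →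
      pvJoin t ∈ bruteforce fuel s := by
  intro s t h
  induction h using Relation.ReflTransGen.head_induction_on with
  | refl => intro fuel _; exact mem_bruteforce_self fuel t
  | head hstep hreach ih =>
    rename_i a b
    intro fuel hfuel
    have hlen : b.length + 1 = a.length := length_of_MStep hstep
    have hlt : t.length ≤ b.length := length_le_of_Reach hreach
    cases fuel with
    | zero => omega
    | succ fuel => exact mem_bruteforce_step hstep (ih fuel (by omega))

theorem nodup_bruteforce : ∀ (fuel : Nat) (s : List Int), (bruteforce fuel s).Nodup := by
  intro fuel
  cases fuel with
  | zero => intro s; exact PySem.Set.nodup_ofList _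
  | succ fuel =>
    intro s
    rw [bruteforce]
    exact nodup_foldl_union _ _ _ _ (PySem.Set.nodup_ofList _)

-- ---- compositions into parts 1..3 ----
def isPart (p : Int) : Prop := p = 1 ∨ p = 2 ∨ p = 3

theorem split2_of_lt {s : List Int} {i : Nat} (h : i + 1 < s.length) :
    s = s.take i ++ [s.getD i 0, s.getD (i + 1) 0] ++ s.drop (i + 2) := by
  have h1 : i < s.length := by omega
  conv_lhs => rw [← List.take_append_drop i s]
  rw [List.drop_eq_getElem_cons h1, List.drop_eq_getElem_cons h]
  rw [List.getD_eq_getElem s 0 h1, List.getD_eq_getElem s 0 h]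
  simp

theorem sum_of_MStep {s t : List Int} (h : MStep s t) : t.sum = s.sum := by
  obtain ⟨i, hi, hc, ht⟩ := h
  conv_rhs => rw [split2_of_lt hi]
  subst ht
  simp [List.sum_append]
  ring

theorem parts_of_MStep {s t : List Int} (h : MStep s t)
    (hs : ∀ p ∈ s, isPart p) : ∀ p ∈ t, isPart p := by
  obtain ⟨i, hi, hc, ht⟩ := h
  have h1 : i < s.length := by omega
  have ha : isPart (s.getD i 0) := by
    rw [List.getD_eq_getElem s 0 h1]; exact hs _ (List.getElem_mem h1)
  have hb : isPart (s.getD (i + 1) 0) := by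
    rw [List.getD_eq_getElem s 0 hi]; exact hs _ (List.getElem_mem hi)
  intro p hp
  subst ht
  simp only [List.mem_append, List.mem_cons, List.not_mem_nil, or_false] at hp
  rcases hp with (hp | hp) | hp
  · exact hs _ (List.mem_of_mem_take hp)
  · subst hp; unfold isPart at *; omega
  · exact hs _ (List.mem_of_mem_drop hp)

theorem reach_invariant {s t : List Int} (h : Reach s t) (hs : ∀ p ∈ s, isPart p) :
    t.sum = s.sum ∧ ∀ p ∈ t, isPart p := by
  induction h with
  | refl => exact ⟨rfl, hs⟩
  | tail _ hst ih =>
    exact ⟨(sum_of_MStep hst).trans ih.1, parts_of_MStep hst ih.2⟩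

theorem reach_comp {n : Nat} {t : List Int} (h : Reach (List.replicate n 1) t) :
    t.sum = (n : Int) ∧ ∀ p ∈ t, isPart p := by
  have hs : ∀ p ∈ List.replicate n (1 : Int), isPart p := by
    intro p hp
    rw [List.eq_of_mem_replicate hp]
    exact Or.inl rfl
  obtain ⟨h1, h2⟩ := reach_invariant h hs
  refine ⟨?_, h2⟩
  rw [h1]
  simp

theorem mstep_cons {s t : List Int} (a : Int) (h : MStep s t) : MStep (a :: s) (a :: t) := by
  obtain ⟨i, hi, hc, ht⟩ := h
  refine ⟨i + 1, by simp; omega, by simpa using hc, ?_⟩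
  subst ht
  simp [List.take_succ_cons, List.drop_succ_cons]

theorem reach_cons {s t : List Int} (a : Int) (h : Reach s t) : Reach (a :: s) (a :: t) :=
  Relation.ReflTransGen.lift (fun l => a :: l) (fun _ _ hxy => mstep_cons a hxy) h

theorem reach_merge_head (p : Int) (l : List Int) (hp : isPart p) :
    Reach (List.replicate p.toNat 1 ++ l) (p :: l) := by
  rcases hp with hp | hp | hp <;> subst hp
  · exact Relation.ReflTransGen.refl
  · refine Relation.ReflTransGen.single ⟨0, by simp, by simp [List.getD], ?_⟩
    simp [List.getD]
  · have h1 : MStep (List.replicate (3 : Int).toNat 1 ++ l) ((2 : Int) :: 1 :: l) :=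
      ⟨0, by simp, by simp [List.getD], by simp [List.getD]⟩
    have h2 : MStep ((2 : Int) :: 1 :: l) (3 :: l) :=
      ⟨0, by simp, by simp [List.getD], by simp [List.getD]⟩
    exact Relation.ReflTransGen.head h1 (Relation.ReflTransGen.single h2)

theorem sum_nonneg_parts {l : List Int} (h : ∀ p ∈ l, isPart p) : 0 ≤ l.sum := by
  induction l with
  | nil => simp
  | cons p l ih =>
    have hp := h p (List.mem_cons_self ..)
    have := ih (fun q hq => h q (List.mem_cons_of_mem _ hq))
    unfold isPart at hp
    simp only [List.sum_cons]
    omega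

theorem comp_reach : ∀ (t : List Int) (n : Nat), (∀ p ∈ t, isPart p) → t.sum = (n : Int) →
    Reach (List.replicate n 1) t := by
  intro t
  induction t with
  | nil =>
    intro n _ hsum
    have : n = 0 := by simpa using hsum.symm
    subst this
    exact Relation.ReflTransGen.refl
  | cons p rest ih =>
    intro n hparts hsum
    have hp : isPart p := hparts p (List.mem_cons_self ..)
    have hrest : ∀ q ∈ rest, isPart q := fun q hq => hparts q (List.mem_cons_of_mem _ hq)
    have hnn : 0 ≤ rest.sum := sum_nonneg_parts hrest
    obtain ⟨m, hm⟩ : ∃ m : Nat, rest.sum = (m : Int) :=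
      ⟨rest.sum.toNat, (Int.toNat_of_nonneg hnn).symm⟩
    have hn : n = p.toNat + m := by
      simp only [List.sum_cons, hm] at hsum
      unfold isPart at hp
      omega
    subst hn
    rw [List.replicate_add]
    exact Relation.ReflTransGen.trans (reach_merge_head p _ hp)
      (reach_cons p (ih m hrest hm))

theorem mem_bruteforce_ones (n : Nat) (x : String) :
    x ∈ bruteforce n (List.replicate n 1) ↔
      ∃ t, (∀ p ∈ t, isPart p) ∧ t.sum = (n : Int) ∧ x = pvJoin t := by
  constructor
  · intro hx
    obtain ⟨t, hr, hxt⟩ := mem_bruteforce_imp _ _ _ hx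
    obtain ⟨hsum, hparts⟩ := reach_comp hr
    exact ⟨t, hparts, hsum, hxt⟩
  · rintro ⟨t, hparts, hsum, rfl⟩
    exact mem_bruteforce_of_reach (comp_reach t n hparts hsum) n (by simp)

-- ---- the explicit list of compositions and its count ----
def comps : Nat → List (List Int)
  | 0 => [[]]
  | 1 => [[1]]
  | 2 => [[1, 1], [2]]
  | n + 3 => (comps (n + 2)).map (fun c => 1 :: c) ++ (comps (n + 1)).map (fun c => 2 :: c)
      ++ (comps n).map (fun c => 3 :: c)

theorem eq_nil_of_parts_sum_zero {t : List Int} (hp : ∀ p ∈ t, isPart p)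
    (hs : t.sum = 0) : t = [] := by
  cases t with
  | nil => rfl
  | cons p rest =>
    exfalso
    have h1 := hp p (List.mem_cons_self ..)
    have h2 := sum_nonneg_parts (fun q hq => hp q (List.mem_cons_of_mem _ hq))
    simp only [List.sum_cons] at hs
    unfold isPart at h1
    omega

theorem eq_single_of_parts_sum_one {t : List Int} (hp : ∀ p ∈ t, isPart p)
    (hs : t.sum = 1) : t = [1] := by
  cases t with
  | nil => simp at hs
  | cons p rest =>
    have h1 := hp p (List.mem_cons_self ..)
    have hrp : ∀ q ∈ rest, isPart q := fun q hq => hp q (List.mem_cons_of_mem _ hq)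
    have h2 := sum_nonneg_parts hrp
    simp only [List.sum_cons] at hs
    have hp1 : p = 1 := by unfold isPart at h1; omega
    subst hp1
    rw [eq_nil_of_parts_sum_zero hrp (by omega)]

theorem mem_comps : ∀ (n : Nat) (t : List Int),
    t ∈ comps n ↔ ((∀ p ∈ t, isPart p) ∧ t.sum = (n : Int)) := by
  intro n
  induction n using Nat.strong_induction_on with
  | _ n ih =>
    rcases n with _ | _ | _ | n
    · intro t
      simp only [comps, List.mem_singleton]
      constructor
      · rintro rfl; simp
      · rintro ⟨hp, hs⟩
        exact eq_nil_of_parts_sum_zero hp (by simpa using hs)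
    · intro t
      simp only [comps, List.mem_singleton]
      constructor
      · rintro rfl
        refine ⟨?_, by simp⟩
        intro p hp
        simp only [List.mem_singleton] at hp
        subst hp
        exact Or.inl rfl
      · rintro ⟨hp, hs⟩
        exact eq_single_of_parts_sum_one hp (by simpa using hs)
    · intro t
      constructor
      · intro h
        simp only [comps, List.mem_cons, List.not_mem_nil, or_false] at h
        rcases h with rfl | rfl
        · refine ⟨?_, by simp⟩
          intro p hp
          simp only [List.mem_cons, List.not_mem_nil, or_false] at hp
          rcases hp with rfl | rfl <;> exact Or.inl rfl
        · refine ⟨?_, by simp⟩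
          intro p hp
          simp only [List.mem_singleton] at hp
          subst hp
          exact Or.inr (Or.inl rfl)
      · rintro ⟨hp, hs⟩
        cases t with
        | nil => simp at hs
        | cons p rest =>
          have h1 := hp p (List.mem_cons_self ..)
          have hrp : ∀ q ∈ rest, isPart q := fun q hq => hp q (List.mem_cons_of_mem _ hq)
          have h2 := sum_nonneg_parts hrp
          simp only [List.sum_cons] at hs
          simp only [comps, List.mem_cons, List.not_mem_nil, or_false]
          rcases h1 with rfl | rfl | rfl
          · left
            rw [eq_single_of_parts_sum_one hrp (by omega)]
          · right
            rw [eq_nil_of_parts_sum_zero hrp (by omega)]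
          · exfalso; omega
    · intro t
      constructor
      · intro h
        simp only [comps, List.mem_append, List.mem_map] at h
        rcases h with (⟨c, hc, rfl⟩ | ⟨c, hc, rfl⟩) | ⟨c, hc, rfl⟩
        · obtain ⟨hcp, hcs⟩ := (ih _ (by omega) c).mp hc
          refine ⟨?_, ?_⟩
          · intro p hp
            rcases List.mem_cons.mp hp with rfl | hp
            · exact Or.inl rfl
            · exact hcp p hp
          · simp only [List.sum_cons, hcs]; push_cast; ring
        · obtain ⟨hcp, hcs⟩ := (ih _ (by omega) c).mp hc
          refine ⟨?_, ?_⟩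
          · intro p hp
            rcases List.mem_cons.mp hp with rfl | hp
            · exact Or.inr (Or.inl rfl)
            · exact hcp p hp
          · simp only [List.sum_cons, hcs]; push_cast; ring
        · obtain ⟨hcp, hcs⟩ := (ih _ (by omega) c).mp hc
          refine ⟨?_, ?_⟩
          · intro p hp
            rcases List.mem_cons.mp hp with rfl | hp
            · exact Or.inr (Or.inr rfl)
            · exact hcp p hp
          · simp only [List.sum_cons, hcs]; push_cast; ring
      · rintro ⟨hp, hs⟩
        cases t with
        | nil => simp at hs; omega
        | cons p rest =>
          have h1 := hp p (List.mem_cons_self ..)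
          have hrp : ∀ q ∈ rest, isPart q := fun q hq => hp q (List.mem_cons_of_mem _ hq)
          simp only [List.sum_cons] at hs
          simp only [comps, List.mem_append, List.mem_map]
          rcases h1 with rfl | rfl | rfl
          · refine Or.inl (Or.inl ⟨rest, (ih (n + 2) (by omega) rest).mpr
              ⟨hrp, ?_⟩, rfl⟩)
            push_cast at hs ⊢
            omega
          · refine Or.inl (Or.inr ⟨rest, (ih (n + 1) (by omega) rest).mpr
              ⟨hrp, ?_⟩, rfl⟩)
            push_cast at hs ⊢
            omega
          · refine Or.inr ⟨rest, (ih n (by omega) rest).mpr ⟨hrp, ?_⟩, rfl⟩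
            push_cast at hs ⊢
            omega

theorem nodup_comps : ∀ (n : Nat), (comps n).Nodup := by
  intro n
  induction n using Nat.strong_induction_on with
  | _ n ih =>
    rcases n with _ | _ | _ | n
    · decide
    · decide
    · decide
    · rw [comps]
      have n1 : ((comps (n + 2)).map (fun c => (1 : Int) :: c)).Nodup :=
        (ih _ (by omega)).map (fun _ _ h => by simpa using h)
      have n2 : ((comps (n + 1)).map (fun c => (2 : Int) :: c)).Nodup :=
        (ih _ (by omega)).map (fun _ _ h => by simpa using h)
      have n3 : ((comps n).map (fun c => (3 : Int) :: c)).Nodup :=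
        (ih _ (by omega)).map (fun _ _ h => by simpa using h)
      refine (n1.append n2 ?_).append n3 ?_
      · intro x hx1 hx2
        simp only [List.mem_map] at hx1 hx2
        obtain ⟨c, _, rfl⟩ := hx1
        obtain ⟨c', _, he⟩ := hx2
        simp at he
      · intro x hx1 hx2
        simp only [List.mem_append, List.mem_map] at hx1 hx2
        obtain ⟨c', _, he⟩ := hx2
        rcases hx1 with ⟨c, _, rfl⟩ | ⟨c, _, rfl⟩ <;> simp at he

def tribAux (n : Nat) : Int × Int × Int :=
  (List.range n).foldl
    (fun (s : Int × Int × Int) _ => (s.1 + s.2.1 + s.2.2, s.1, s.2.1)) (1, 0, 0)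

theorem tribAux_succ (n : Nat) :
    tribAux (n + 1) = ((tribAux n).1 + (tribAux n).2.1 + (tribAux n).2.2,
      (tribAux n).1, (tribAux n).2.1) := by
  simp [tribAux, List.range_succ]

theorem run_count_eq_tribAux (n : Nat) : run_count n = (tribAux n).1 := rfl

theorem run_count_rec (n : Nat) :
    run_count (n + 3) = run_count (n + 2) + run_count (n + 1) + run_count n := by
  simp only [run_count_eq_tribAux]
  rw [tribAux_succ (n + 2), tribAux_succ (n + 1), tribAux_succ n]

theorem length_comps : ∀ (n : Nat), ((comps n).length : Int) = run_count n := by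
  intro n
  induction n using Nat.strong_induction_on with
  | _ n ih =>
    rcases n with _ | _ | _ | n
    · decide
    · decide
    · decide
    · rw [comps, run_count_rec]
      rw [← ih (n + 2) (by omega), ← ih (n + 1) (by omega), ← ih n (by omega)]
      simp only [List.length_append, List.length_map]
      push_cast
      ring

-- ---- injectivity of pvJoin on compositions ----
def partChar (p : Int) : Char := if p = 1 then '1' else if p = 2 then '2' else '3'

theorem toList_pvJoin {t : List Int} (h : ∀ p ∈ t, isPart p) :
    (pvJoin t).toList = t.map partChar := by
  unfold pvJoin
  rw [PySem.Str.toList_join]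
  have he : (t.map PySem.Int.toStr).map String.toList =
      (t.map partChar).map (fun c => [c]) := by
    simp only [List.map_map]
    apply List.map_congr_left
    intro p hp
    rcases h p hp with rfl | rfl | rfl <;> rfl
  rw [he]
  simpa using PySem.Chars.join_nil_singletons (t.map partChar)

theorem map_partChar_inj : ∀ {t t' : List Int}, (∀ p ∈ t, isPart p) →
    (∀ p ∈ t', isPart p) → t.map partChar = t'.map partChar → t = t' := by
  intro t
  induction t with
  | nil =>
    intro t' _ _ h
    cases t' with
    | nil => rfl
    | cons q rest' => simp at h
  | cons p rest ih =>
    intro t' hp hp' h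
    cases t' with
    | nil => simp at h
    | cons q rest' =>
      simp only [List.map_cons, List.cons.injEq] at h
      have h1 := hp p (List.mem_cons_self ..)
      have h2 := hp' q (List.mem_cons_self ..)
      have hpq : p = q := by
        rcases h1 with rfl | rfl | rfl <;> rcases h2 with rfl | rfl | rfl <;>
          first
          | rfl
          | (exfalso; exact absurd h.1 (by decide))
      subst hpq
      rw [ih (fun r hr => hp r (List.mem_cons_of_mem _ hr))
        (fun r hr => hp' r (List.mem_cons_of_mem _ hr)) h.2]

theorem pvJoin_inj : ∀ {t t' : List Int}, (∀ p ∈ t, isPart p) → (∀ p ∈ t', isPart p) →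
    pvJoin t = pvJoin t' → t = t' := by
  intro t t' hp hp' h
  have := congrArg String.toList h
  rw [toList_pvJoin hp, toList_pvJoin hp'] at this
  exact map_partChar_inj hp hp' this

-- ---- the central count: |bruteforce([1]*n)| = run_count n ----
theorem bruteforce_ones_eq (n : Nat) : bruteforce_ones n = run_count n := by
  have hnodupS : (bruteforce n (List.replicate n 1)).Nodup := nodup_bruteforce _ _
  have hnodupC : ((comps n).map pvJoin).Nodup := by
    refine (nodup_comps n).map_on ?_
    intro t ht t' ht' he
    exact pvJoin_inj ((mem_comps n t).mp ht).1 ((mem_comps n t').mp ht').1 he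
  have hmem : ∀ x, x ∈ bruteforce n (List.replicate n 1) ↔ x ∈ (comps n).map pvJoin := by
    intro x
    rw [mem_bruteforce_ones]
    simp only [List.mem_map]
    constructor
    · rintro ⟨t, hq, hs, rfl⟩
      exact ⟨t, (mem_comps n t).mpr ⟨hq, hs⟩, rfl⟩
    · rintro ⟨t, ht, rfl⟩
      obtain ⟨hq, hs⟩ := (mem_comps n t).mp ht
      exact ⟨t, hq, hs, rfl⟩
  have hperm := (List.perm_ext_iff_of_nodup hnodupS hnodupC).mpr hmem
  show ((bruteforce n (List.replicate n 1)).length : Int) = run_count n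
  rw [hperm.length_eq, List.length_map, length_comps]

-- ---- the two scans agree ----
def goodDict (d : PySem.Dict Nat Int) : Prop :=
  ∀ k v, d.get? k = some v → v = bruteforce_ones k

theorem psLoop_eq : ∀ (rest : List Int) (current : Nat) (s_opt : Option Nat)
    (seq_perms : PySem.Dict Nat Int) (perms : Int), goodDict seq_perms →
    (∀ s, s_opt = some s → s ≤ current) →
    psLoop rest current s_opt seq_perms perms =
      (rest.foldl bstep (perms, match s_opt with | none => 0 | some s => current - s)).1 := by
  intro rest
  induction rest with
  | nil => intro current s_opt seq_perms perms _ _; rfl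
  | cons x rest ih =>
    intro current s_opt seq_perms perms hgood hle
    cases s_opt with
    | none =>
      simp only [psLoop, List.foldl_cons]
      by_cases hx : x = 1
      · subst hx
        rw [if_pos rfl]
        rw [ih (current + 1) (some current) seq_perms perms hgood
          (fun s hs => by cases hs; omega)]
        simp [bstep]
      · rw [if_neg hx]
        rw [ih (current + 1) none seq_perms perms hgood (fun s hs => by cases hs)]
        have h0 : bstep (perms, 0) x = (perms, 0) := by
          simp [bstep, hx, run_count]
        rw [h0]
    | some s =>
      simp only [psLoop, List.foldl_cons]
      by_cases hx : x = 1
      · subst hx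
        rw [if_pos rfl]
        have hsc : s ≤ current := hle s rfl
        rw [ih (current + 1) (some s) seq_perms perms hgood
          (fun s' hs' => by cases hs'; omega)]
        have h1 : current + 1 - s = (current - s) + 1 := by omega
        simp [bstep, h1]
      · rw [if_neg hx]
        have hrc : bstep (perms, current - s) x
            = (perms * run_count (current - s), 0) := by
          simp [bstep, hx]
        rw [hrc]
        cases hget : seq_perms.get? (current - s) with
        | some v =>
          have hv : v = run_count (current - s) :=
            (hgood _ _ hget).trans (bruteforce_ones_eq _)
          show psLoop rest (current + 1) none seq_perms (perms * v) = _
          rw [ih (current + 1) none seq_perms (perms * v) hgood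
            (fun s' hs' => by cases hs'), hv]
        | none =>
          have hgood' : goodDict (seq_perms.insert (current - s)
              (bruteforce_ones (current - s))) := by
            intro k w hk
            by_cases hks : k = current - s
            · subst hks
              rw [PySem.Dict.get?_insert_self] at hk
              cases hk; rfl
            · rw [PySem.Dict.get?_insert_of_ne _ _ hks] at hk
              exact hgood _ _ hk
          show psLoop rest (current + 1) none _ (perms * bruteforce_ones (current - s)) = _
          rw [ih (current + 1) none _ _ hgood' (fun s' hs' => by cases hs')]
          rw [bruteforce_ones_eq]

theorem permutation_search_eq_fold (diffs : List Int) :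
    permutation_search diffs = (diffs.foldl bstep (1, 0)).1 := by
  unfold permutation_search
  rw [psLoop_eq diffs 0 none PySem.Dict.empty 1
    (fun k v hk => by rw [PySem.Dict.get?_empty] at hk; cases hk)
    (fun s hs => by cases hs)]

-- ---- the trailing run ----
def trailOnes (l : List Int) : Nat := (l.reverse.takeWhile (fun d => d == 1)).length

theorem trailOnes_append_one (l : List Int) :
    trailOnes (l ++ [1]) = trailOnes l + 1 := by
  unfold trailOnes
  rw [List.reverse_append]
  simp

theorem trailOnes_append_ne (l : List Int) {d : Int} (hd : d ≠ 1) :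
    trailOnes (l ++ [d]) = 0 := by
  unfold trailOnes
  rw [List.reverse_append]
  simp [hd]

theorem foldl_bstep_run : ∀ (l : List Int) (st : Int × Nat),
    (l.foldl bstep st).2 = if l.all (fun d => d == 1) then st.2 + l.length else trailOnes l := by
  intro l
  induction l using List.reverseRecOn with
  | nil => intro st; simp
  | append_singleton l d ih =>
    intro st
    rw [List.foldl_append]
    simp only [List.foldl_cons, List.foldl_nil]
    by_cases hd : d = 1
    · subst hd
      have hb : (bstep (l.foldl bstep st) 1).2 = (l.foldl bstep st).2 + 1 := by
        simp [bstep]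
      rw [hb, ih st]
      by_cases ha : l.all (fun d => d == 1)
      · have : (l ++ [(1 : Int)]).all (fun d => d == 1) = true := by
          simp [List.all_append, ha]
        rw [if_pos ha, if_pos this]
        simp
        omega
      · have : (l ++ [(1 : Int)]).all (fun d => d == 1) = false := by
          simp only [List.all_append, List.all_cons, List.all_nil]
          simp [ha]
        rw [if_neg ha, this, if_neg (by simp), trailOnes_append_one]
    · have hb : (bstep (l.foldl bstep st) d).2 = 0 := by
        simp [bstep, hd]
      rw [hb]
      have : (l ++ [d]).all (fun d => d == 1) = false := by
        simp [List.all_append, hd]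
      rw [this, if_neg (by simp), trailOnes_append_ne l hd]

theorem takeWhile_length_of_all {l : List Int} (h : l.all (fun d => d == 1)) :
    (l.takeWhile (fun d => d == 1)).length = l.length := by
  induction l with
  | nil => rfl
  | cons x l ih =>
    simp only [List.all_cons, Bool.and_eq_true] at h
    simp [List.takeWhile, h.1, ih h.2]

theorem snd_foldl_bstep (l : List Int) (p : Int) :
    (l.foldl bstep (p, 0)).2 = trailOnes l := by
  rw [foldl_bstep_run]
  by_cases ha : l.all (fun d => d == 1)
  · rw [if_pos ha]
    unfold trailOnes
    rw [takeWhile_length_of_all (by simpa using ha)]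
    simp
  · rw [if_neg ha]

theorem D_iff (diffs : List Int) : D_permutation_search diffs ↔ 2 ≤ trailOnes diffs := by
  unfold D_permutation_search trailOnes
  rcases diffs.reverse with _ | ⟨a, _ | ⟨b, r⟩⟩
  · simp
  · by_cases ha : a = 1 <;>
      have h1 : (a == 1) = decide (a = 1) := rfl <;>
      simp [List.takeWhile, h1, ha]
  · have h1 : (a == 1) = decide (a = 1) := rfl
    have h2 : (b == 1) = decide (b = 1) := rfl
    by_cases ha : a = 1
    · by_cases hb : b = 1
      · subst ha; subst hb
        simp only [List.takeWhile, h1]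
        simp
      · subst ha
        simp only [List.takeWhile, h1, h2, List.take]
        simp [hb]
    · simp only [List.takeWhile, h1, h2, List.take]
      simp [ha]

-- ---- positivity (for Claim_exact) ----
theorem alt_eq (diffs : List Int) :
    permutation_search_alt diffs =
      (diffs.foldl bstep (1, 0)).1 * run_count (diffs.foldl bstep (1, 0)).2 := rfl

theorem tribAux_invariant (n : Nat) :
    1 ≤ (tribAux n).1 ∧ 0 ≤ (tribAux n).2.1 ∧ 0 ≤ (tribAux n).2.2 := by
  induction n with
  | zero => norm_num [tribAux]
  | succ n ih =>
    rw [tribAux_succ]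
    exact ⟨by linarith [ih.1, ih.2.1, ih.2.2], by linarith [ih.1], ih.2.1⟩

theorem run_count_pos (n : Nat) : 1 ≤ run_count n := by
  rw [run_count_eq_tribAux]
  exact (tribAux_invariant n).1

theorem run_count_mono (n : Nat) : run_count n ≤ run_count (n + 1) := by
  rw [run_count_eq_tribAux, run_count_eq_tribAux, tribAux_succ]
  have := tribAux_invariant n
  have h1 := this.2.1
  have h2 := this.2.2
  simp only
  linarith

theorem run_count_two_le {n : Nat} (h : 2 ≤ n) : 2 ≤ run_count n := by
  induction n, h using Nat.le_induction with
  | base => decide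
  | succ n hn ih => exact le_trans ih (run_count_mono n)

theorem fst_foldl_bstep_pos (l : List Int) (st : Int × Nat) (h : 1 ≤ st.1) :
    1 ≤ (l.foldl bstep st).1 := by
  induction l generalizing st with
  | nil => exact h
  | cons d l ih =>
    simp only [List.foldl_cons]
    apply ih
    unfold bstep
    by_cases hd : d = 1
    · simpa [hd] using h
    · rw [if_neg hd]
      have := run_count_pos st.2
      nlinarith

-- ===== VERDICT (by name: the statement is the Claim_ definition above) =====
theorem permutation_search_spec : Claim_unchanged_permutation_search := by
  intro diffs _ hD
  rw [permutation_search_eq_fold]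
  rw [alt_eq]
  have h2 : (diffs.foldl bstep (1, 0)).2 = trailOnes diffs := snd_foldl_bstep diffs 1
  have hle : trailOnes diffs ≤ 1 := by
    by_contra hgt
    exact hD ((D_iff diffs).mpr (by omega))
  rw [h2]
  interval_cases h : trailOnes diffs <;> simp [run_count]

theorem permutation_search_changed : Claim_changed_permutation_search := by
  unfold Claim_changed_permutation_search; decide

theorem permutation_search_tight : Claim_exact_permutation_search := by
  intro diffs _ hD
  rw [permutation_search_eq_fold]
  rw [alt_eq]
  have h2 : (diffs.foldl bstep (1, 0)).2 = trailOnes diffs := snd_foldl_bstep diffs 1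
  have hrun : 2 ≤ trailOnes diffs := (D_iff diffs).mp hD
  have hpos : 1 ≤ (diffs.foldl bstep (1, 0)).1 := fst_foldl_bstep_pos _ _ (by norm_num)
  have hrc : 2 ≤ run_count (diffs.foldl bstep (1, 0)).2 := by
    rw [h2]; exact run_count_two_le hrun
  nlinarith [hpos, hrc]
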